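/- GENERATED by farm/mkstatement.py from design/units.split.tsv — do not edit.
   THE SPLIT of the proof unit `start_decoder.R1` into `start_decoder.R1a`, `start_decoder.R1b`, `start_decoder.R1c`, `start_decoder.R1d`: the children's statements give the parent's
   UNCHANGED statement (so nothing above the parent — callers, compositions — is touched by the split). -/
import Vorbis.Spec.StartDecoderR1
import Vorbis.Spec.Units.start_decoder_R1
import Vorbis.Spec.Units.start_decoder_R1a
import Vorbis.Spec.Units.start_decoder_R1b
import Vorbis.Spec.Units.start_decoder_R1c
import Vorbis.Spec.Units.start_decoder_R1d
namespace Vorbis.Spec.Splits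
open X86 X86.User Asan

/-- The children of the split unit `start_decoder.R1` prove it, by `Vorbis.Spec.StartDecoder.SegR1.of_parts`. -/
theorem start_decoder_R1
    (h_start_decoder_R1a : Vorbis.Spec.start_decoder_R1a.Statement)
    (h_start_decoder_R1b : Vorbis.Spec.start_decoder_R1b.Statement)
    (h_start_decoder_R1c : Vorbis.Spec.start_decoder_R1c.Statement)
    (h_start_decoder_R1d : Vorbis.Spec.start_decoder_R1d.Statement) :
    Vorbis.Spec.start_decoder_R1.Statement := by
  intro Lay _hLay μ _hμ u₀ _hcode _h_get_bits _h_asan_store4_noabort _h_setup_malloc _h_asan_store8_noabort _h_error _h_asan_load4_noabort _h_memset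
  apply Vorbis.Spec.StartDecoder.SegR1.of_parts
  · exact h_start_decoder_R1a Lay _hLay μ _hμ u₀ _hcode _h_get_bits
  · exact h_start_decoder_R1b Lay _hLay μ _hμ u₀ _hcode _h_asan_store4_noabort _h_setup_malloc
  · exact h_start_decoder_R1c Lay _hLay μ _hμ u₀ _hcode _h_asan_store8_noabort _h_error _h_asan_load4_noabort _h_memset
  · exact h_start_decoder_R1d Lay _hLay μ _hμ u₀ _hcode

end Vorbis.Spec.Splits
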